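-- pv_equiv track=rewrite | github.com/Mgnsoscar/FDTDream | src/FDTDiscover/field_plot/controllers/canvas_controller.py | get_fields_with_inplane_components
-- ===== SOURCE A (Python) =====
-- from typing import List, Optional, Dict, Tuple
--
-- def get_fields_with_inplane_components(
--         plot_types: List[str],
--         fields: List[Tuple[str, str, List[str]]],
-- ) -> Dict[str, List[str]]:
--     """
--     For each 2D plot type, return the list of fields that have both in-plane components.
--     Input:
--         - plot_types: list of valid plot types from `analyze_shape`
--         - fields: list of (field_name, component_string) tuples, e.g. ("E", "xy")
--     Output:
--         - Dict mapping each 2D plot type to a list of field names with in-plane components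
--     """
--     component_map = {
--         "XY Plane": ("x", "y"),
--         "YZ Plane": ("y", "z"),
--         "XZ Plane": ("x", "z"),
--     }
--
--     result = {}
--
--     for plot_type in plot_types:
--         if plot_type not in component_map:
--             continue
--
--         c1, c2 = component_map[plot_type]
--         valid_fields = [
--             name for name, comps in fields
--             if c1 in comps and c2 in comps
--         ]
--
--         result[plot_type] = valid_fields
--
--     return result
-- ===== SOURCE B (Python) =====
-- def get_fields_with_inplane_components(plot_types, fields):
--     # Classify each field once by an axis-presence bitmask (bit0=x, bit1=y, bit2=z),
--     # dispatch it through a precomputed mask -> planes table into three fixed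
--     # buckets, then select the requested planes in first-occurrence order.
--     planes_of_mask = {
--         3: ["XY Plane"],
--         5: ["XZ Plane"],
--         6: ["YZ Plane"],
--         7: ["XY Plane", "YZ Plane", "XZ Plane"],
--     }
--     buckets = {"XY Plane": [], "YZ Plane": [], "XZ Plane": []}
--     for name, comps in fields:
--         mask = ("x" in comps) + 2 * ("y" in comps) + 4 * ("z" in comps)
--         for plane in planes_of_mask.get(mask, []):
--             buckets[plane].append(name)
--     return {pt: buckets[pt] for pt in plot_types if pt in buckets}
-- ===== Notes on version B (the rewrite author's own statement) =====
-- stated objective: alternative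
-- what changed: B classifies each field exactly once by an axis-presence bitmask and dispatches it through a precomputed mask-to-planes lookup table into three fixed buckets in a single pass, then selects the requested planes; A instead rescans the whole fields list with fresh per-plane substring membership tests for every requested plot type.
import Mathlib
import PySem

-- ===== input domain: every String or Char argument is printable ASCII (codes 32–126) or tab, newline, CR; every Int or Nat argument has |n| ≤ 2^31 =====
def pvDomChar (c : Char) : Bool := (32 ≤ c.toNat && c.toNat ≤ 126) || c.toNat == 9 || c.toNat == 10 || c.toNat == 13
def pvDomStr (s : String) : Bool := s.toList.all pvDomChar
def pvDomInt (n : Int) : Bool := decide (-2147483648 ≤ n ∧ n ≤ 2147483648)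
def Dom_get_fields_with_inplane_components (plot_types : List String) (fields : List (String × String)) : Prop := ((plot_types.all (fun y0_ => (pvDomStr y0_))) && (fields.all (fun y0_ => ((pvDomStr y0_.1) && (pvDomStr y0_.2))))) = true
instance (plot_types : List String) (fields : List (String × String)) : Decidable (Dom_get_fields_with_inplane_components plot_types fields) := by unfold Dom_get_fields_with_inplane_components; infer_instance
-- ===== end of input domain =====

-- B classifies each field once by an axis-presence bitmask, dispatches it through a
-- precomputed mask→planes table into three fixed buckets in one pass, then selects the
-- requested planes; A rescans all fields per requested plane (objective: alternative).

-- ===== PORT A =====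
-- the dict literal `component_map`
def pvCmapA : PySem.Dict String (String × String) :=
  PySem.Dict.mk [("XY Plane", ("x", "y")), ("YZ Plane", ("y", "z")), ("XZ Plane", ("x", "z"))]

def get_fields_with_inplane_components (plot_types : List String) (fields : List (String × String)) : List (String × List String) :=
  -- `for plot_type in plot_types: if plot_type not in component_map: continue; …; result[plot_type] = valid_fields`
  (plot_types.foldl
    (fun (result : PySem.Dict String (List String)) plot_type =>
      match pvCmapA.get? plot_type with
      | none => result
      | some (c1, c2) =>
          result.insert plot_type
            ((fields.filter (fun f => PySem.Str.isIn c1 f.2 && PySem.Str.isIn c2 f.2)).map (·.1)))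
    PySem.Dict.empty).items

-- ===== PORT B =====
-- the dict literal `planes_of_mask`
def pvMaskTable : PySem.Dict Int (List String) :=
  PySem.Dict.mk [(3, ["XY Plane"]), (5, ["XZ Plane"]), (6, ["YZ Plane"]),
                 (7, ["XY Plane", "YZ Plane", "XZ Plane"])]

-- the dict literal `buckets`
def pvBuckets0 : PySem.Dict String (List String) :=
  PySem.Dict.mk [("XY Plane", []), ("YZ Plane", []), ("XZ Plane", [])]

-- `mask = ("x" in comps) + 2 * ("y" in comps) + 4 * ("z" in comps)`
def pvMask (comps : String) : Int :=
  (if PySem.Str.isIn "x" comps then 1 else 0)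
    + 2 * (if PySem.Str.isIn "y" comps then 1 else 0)
    + 4 * (if PySem.Str.isIn "z" comps then 1 else 0)

-- loop body: `for plane in planes_of_mask.get(mask, []): buckets[plane].append(name)`
def pvStepB (b : PySem.Dict String (List String)) (f : String × String) : PySem.Dict String (List String) :=
  (pvMaskTable.getD (pvMask f.2) []).foldl (fun b' pl => b'.modify pl [] (· ++ [f.1])) b

def get_fields_with_inplane_components_alt (plot_types : List String) (fields : List (String × String)) : List (String × List String) :=
  let buckets := fields.foldl pvStepB pvBuckets0
  -- `{pt: buckets[pt] for pt in plot_types if pt in buckets}`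
  (plot_types.foldl
    (fun (r : PySem.Dict String (List String)) pt =>
      if buckets.contains pt then r.insert pt (buckets.getD pt []) else r)
    PySem.Dict.empty).items

-- ===== PRECONDITION & SPEC =====
def Spec_get_fields_with_inplane_components (plot_types : List String) (fields : List (String × String)) (out : List (String × List String)) : Prop := out = get_fields_with_inplane_components_alt plot_types fields
instance (plot_types : List String) (fields : List (String × String)) (out : List (String × List String)) : Decidable (Spec_get_fields_with_inplane_components plot_types fields out) := by unfold Spec_get_fields_with_inplane_components; infer_instance

-- ===== CLAIM =====
def Claim_equal_get_fields_with_inplane_components : Prop := ∀ (plot_types : List String) (fields : List (String × String)), Dom_get_fields_with_inplane_components plot_types fields → Spec_get_fields_with_inplane_components plot_types fields (get_fields_with_inplane_components plot_types fields)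

-- ===== LEMMAS AND PROOFS =====

def pvPlanes : List String := ["XY Plane", "YZ Plane", "XZ Plane"]

def pvIsPlane (pt : String) : Bool := decide (pt ∈ pvPlanes)

def pvPair (pt : String) : String × String :=
  if "XY Plane" = pt then ("x", "y") else if "YZ Plane" = pt then ("y", "z") else ("x", "z")

def pvMatch (pt : String) (comps : String) : Bool :=
  PySem.Str.isIn (pvPair pt).1 comps && PySem.Str.isIn (pvPair pt).2 comps

def pvVal (fields : List (String × String)) (pt : String) : List String :=
  (fields.filter (fun f => pvMatch pt f.2)).map (·.1)

-- A's loop body is the canonical "insert pvVal at plane keys" body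
theorem pvStepA_eq (fields : List (String × String)) :
    (fun (result : PySem.Dict String (List String)) plot_type =>
      match pvCmapA.get? plot_type with
      | none => result
      | some (c1, c2) =>
          result.insert plot_type
            ((fields.filter (fun f => PySem.Str.isIn c1 f.2 && PySem.Str.isIn c2 f.2)).map (·.1)))
    = (fun d pt => if pvIsPlane pt then d.insert pt (pvVal fields pt) else d) := by
  funext d pt
  by_cases h1 : "XY Plane" = pt
  · subst h1
    simp [pvCmapA, PySem.Dict.get?_mk_cons, pvIsPlane, pvPlanes, pvVal, pvMatch, pvPair]
  · by_cases h2 : "YZ Plane" = pt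
    · subst h2
      simp [pvCmapA, PySem.Dict.get?_mk_cons, pvIsPlane, pvPlanes, pvVal, pvMatch, pvPair]
    · by_cases h3 : "XZ Plane" = pt
      · subst h3
        simp [pvCmapA, PySem.Dict.get?_mk_cons, pvIsPlane, pvPlanes, pvVal, pvMatch, pvPair]
      · have e1 : pt ≠ "XY Plane" := fun h => h1 h.symm
        have e2 : pt ≠ "YZ Plane" := fun h => h2 h.symm
        have e3 : pt ≠ "XZ Plane" := fun h => h3 h.symm
        simp [pvCmapA, pvIsPlane, pvPlanes, PySem.Dict.get?, h1, h2, h3, e1, e2, e3]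

-- facts about the dispatch list for one field
theorem pvL_nodup (comps : String) : (pvMaskTable.getD (pvMask comps) []).Nodup := by
  by_cases hx : PySem.Str.isIn "x" comps = true <;>
  by_cases hy : PySem.Str.isIn "y" comps = true <;>
  by_cases hz : PySem.Str.isIn "z" comps = true <;>
  simp only [pvMask, hx, hy, hz] <;> decide

theorem pvL_sub (comps : String) : ∀ p ∈ pvMaskTable.getD (pvMask comps) [], p ∈ pvPlanes := by
  by_cases hx : PySem.Str.isIn "x" comps = true <;>
  by_cases hy : PySem.Str.isIn "y" comps = true <;>
  by_cases hz : PySem.Str.isIn "z" comps = true <;>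
  simp only [pvMask, hx, hy, hz] <;> decide

theorem pvL_mem_xy (comps : String) :
    "XY Plane" ∈ pvMaskTable.getD (pvMask comps) [] ↔
      (PySem.Str.isIn "x" comps && PySem.Str.isIn "y" comps) = true := by
  by_cases hx : PySem.Str.isIn "x" comps = true <;>
  by_cases hy : PySem.Str.isIn "y" comps = true <;>
  by_cases hz : PySem.Str.isIn "z" comps = true <;>
  simp only [pvMask, hx, hy, hz] <;> decide

theorem pvL_mem_yz (comps : String) :
    "YZ Plane" ∈ pvMaskTable.getD (pvMask comps) [] ↔
      (PySem.Str.isIn "y" comps && PySem.Str.isIn "z" comps) = true := by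
  by_cases hx : PySem.Str.isIn "x" comps = true <;>
  by_cases hy : PySem.Str.isIn "y" comps = true <;>
  by_cases hz : PySem.Str.isIn "z" comps = true <;>
  simp only [pvMask, hx, hy, hz] <;> decide

theorem pvL_mem_xz (comps : String) :
    "XZ Plane" ∈ pvMaskTable.getD (pvMask comps) [] ↔
      (PySem.Str.isIn "x" comps && PySem.Str.isIn "z" comps) = true := by
  by_cases hx : PySem.Str.isIn "x" comps = true <;>
  by_cases hy : PySem.Str.isIn "y" comps = true <;>
  by_cases hz : PySem.Str.isIn "z" comps = true <;>
  simp only [pvMask, hx, hy, hz] <;> decide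

theorem pvL_mem (comps : String) (k : String) (hk : k ∈ pvPlanes) :
    k ∈ pvMaskTable.getD (pvMask comps) [] ↔ pvMatch k comps = true := by
  rcases (by simpa [pvPlanes] using hk :
      k = "XY Plane" ∨ k = "YZ Plane" ∨ k = "XZ Plane") with rfl | rfl | rfl
  · exact (pvL_mem_xy comps).trans (by rw [show pvMatch "XY Plane" comps
      = (PySem.Str.isIn "x" comps && PySem.Str.isIn "y" comps) from rfl])
  · exact (pvL_mem_yz comps).trans (by rw [show pvMatch "YZ Plane" comps
      = (PySem.Str.isIn "y" comps && PySem.Str.isIn "z" comps) from rfl])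
  · exact (pvL_mem_xz comps).trans (by rw [show pvMatch "XZ Plane" comps
      = (PySem.Str.isIn "x" comps && PySem.Str.isIn "z" comps) from rfl])

-- the generic "append x at each key of L" loop
theorem pvFoldMod_keys (x : String) (L : List String) :
    ∀ (b : PySem.Dict String (List String)), (∀ p ∈ L, b.contains p = true) →
    (L.foldl (fun b' pl => b'.modify pl [] (· ++ [x])) b).keys = b.keys := by
  induction L with
  | nil => intro b _; rfl
  | cons pl L ih =>
    intro b hc
    rw [List.foldl_cons]
    have hpl : b.contains pl = true := hc pl (by simp)
    have hkeys : (b.modify pl [] (· ++ [x])).keys = b.keys := by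
      rw [PySem.Dict.keys_modify]
      exact PySem.Dict.keys_insert_of_contains _ _ hpl
    have hcm : ∀ q, (b.modify pl [] (· ++ [x])).contains q = b.contains q := by
      intro q
      rw [PySem.Dict.contains_eq_decide_mem_keys, hkeys,
          ← PySem.Dict.contains_eq_decide_mem_keys]
    rw [ih _ (fun p hp => by rw [hcm]; exact hc p (List.mem_cons_of_mem _ hp)), hkeys]

theorem pvFoldMod_getD (x : String) (L : List String) :
    ∀ (b : PySem.Dict String (List String)), L.Nodup → ∀ (k : String),
    (L.foldl (fun b' pl => b'.modify pl [] (· ++ [x])) b).getD k []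
      = b.getD k [] ++ (if k ∈ L then [x] else []) := by
  induction L with
  | nil => intro b _ k; simp
  | cons pl L ih =>
    intro b hnd k
    rw [List.foldl_cons, ih _ (List.nodup_cons.mp hnd).2 k, PySem.Dict.getD_modify]
    by_cases hkpl : k = pl
    · subst hkpl
      have : k ∉ L := (List.nodup_cons.mp hnd).1
      simp [this]
    · simp [hkpl]

-- one field's dispatch step
theorem pvStepB_keys (b : PySem.Dict String (List String)) (f : String × String)
    (h : b.keys = pvPlanes) : (pvStepB b f).keys = pvPlanes := by
  unfold pvStepB
  rw [pvFoldMod_keys _ _ b (fun p hp => by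
    rw [PySem.Dict.contains_eq_decide_mem_keys, h]
    exact decide_eq_true (pvL_sub f.2 p hp)), h]

theorem pvStepB_getD (b : PySem.Dict String (List String)) (f : String × String) (k : String)
    (hk : k ∈ pvPlanes) :
    (pvStepB b f).getD k [] = b.getD k [] ++ (if pvMatch k f.2 then [f.1] else []) := by
  unfold pvStepB
  rw [pvFoldMod_getD _ _ b (pvL_nodup f.2) k]
  congr 1
  by_cases hm : pvMatch k f.2 = true
  · rw [if_pos ((pvL_mem f.2 k hk).mpr hm), if_pos hm]
  · rw [if_neg (fun h => hm ((pvL_mem f.2 k hk).mp h)), if_neg hm]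

-- the whole pass over fields
theorem pvFoldB_keys (fields : List (String × String)) :
    ∀ (b : PySem.Dict String (List String)), b.keys = pvPlanes →
    (fields.foldl pvStepB b).keys = pvPlanes := by
  induction fields with
  | nil => intro b h; exact h
  | cons f fs ih => intro b h; rw [List.foldl_cons]; exact ih _ (pvStepB_keys b f h)

theorem pvFoldB_getD (fields : List (String × String)) :
    ∀ (b : PySem.Dict String (List String)), b.keys = pvPlanes → ∀ k ∈ pvPlanes,
    (fields.foldl pvStepB b).getD k [] = b.getD k [] ++ pvVal fields k := by
  induction fields with
  | nil => intro b _ k _; simp [pvVal]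
  | cons f fs ih =>
    intro b h k hk
    rw [List.foldl_cons, ih _ (pvStepB_keys b f h) k hk, pvStepB_getD b f k hk]
    by_cases hm : pvMatch k f.2 = true
    · simp [pvVal, hm]
    · simp [pvVal, hm]

-- ===== VERDICT (by name: the statement is the Claim_ definition above) =====
theorem get_fields_with_inplane_components_spec : Claim_equal_get_fields_with_inplane_components := by
  intro plot_types fields _
  unfold Spec_get_fields_with_inplane_components
  unfold get_fields_with_inplane_components get_fields_with_inplane_components_alt
  rw [pvStepA_eq fields]
  show _ = (plot_types.foldl
      (fun (r : PySem.Dict String (List String)) pt =>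
        if (fields.foldl pvStepB pvBuckets0).contains pt
        then r.insert pt ((fields.foldl pvStepB pvBuckets0).getD pt []) else r)
      PySem.Dict.empty).items
  have hkeys : (fields.foldl pvStepB pvBuckets0).keys = pvPlanes :=
    pvFoldB_keys fields pvBuckets0 (by decide)
  have hbody : (fun (r : PySem.Dict String (List String)) pt =>
      if (fields.foldl pvStepB pvBuckets0).contains pt
      then r.insert pt ((fields.foldl pvStepB pvBuckets0).getD pt []) else r)
      = (fun d pt => if pvIsPlane pt then d.insert pt (pvVal fields pt) else d) := by
    funext r pt
    have hc : (fields.foldl pvStepB pvBuckets0).contains pt = pvIsPlane pt := by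
      rw [PySem.Dict.contains_eq_decide_mem_keys, hkeys]; rfl
    rw [hc]
    by_cases hp : pvIsPlane pt = true
    · have hmem : pt ∈ pvPlanes := by simpa [pvIsPlane] using hp
      have hg : (fields.foldl pvStepB pvBuckets0).getD pt [] = pvVal fields pt := by
        rw [pvFoldB_getD fields pvBuckets0 (by decide) pt hmem]
        rcases (by simpa [pvPlanes] using hmem :
            pt = "XY Plane" ∨ pt = "YZ Plane" ∨ pt = "XZ Plane") with rfl | rfl | rfl <;> rfl
      rw [if_pos hp, if_pos hp, hg]
    · rw [if_neg hp, if_neg hp]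
  rw [hbody]
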